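-- pv_equiv track=rewrite | github.com/marat2183/Python_Labs_sem2 | shift_magma.py | get_s_blocks_input
-- ===== SOURCE A (Python) =====
-- def get_s_blocks_input(text):
--     res = []
--     for i in range(8):
--         temp = text & 0b1111
--         res.append(temp)
--         text = text >> 4
--     res.reverse()
--     return res
-- ===== SOURCE B (Python) =====
-- def get_s_blocks_input(text):
--     return [int(c, 16) for c in format(text & 0xFFFFFFFF, '08x')]
-- ===== Notes on version B (the rewrite author's own statement) =====
-- stated objective: idiomatic
-- what changed: B formats the low 32 bits as a zero-padded 8-digit hex string and converts each digit, instead of A's shift-and-mask loop with a final reverse.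
import Mathlib
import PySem

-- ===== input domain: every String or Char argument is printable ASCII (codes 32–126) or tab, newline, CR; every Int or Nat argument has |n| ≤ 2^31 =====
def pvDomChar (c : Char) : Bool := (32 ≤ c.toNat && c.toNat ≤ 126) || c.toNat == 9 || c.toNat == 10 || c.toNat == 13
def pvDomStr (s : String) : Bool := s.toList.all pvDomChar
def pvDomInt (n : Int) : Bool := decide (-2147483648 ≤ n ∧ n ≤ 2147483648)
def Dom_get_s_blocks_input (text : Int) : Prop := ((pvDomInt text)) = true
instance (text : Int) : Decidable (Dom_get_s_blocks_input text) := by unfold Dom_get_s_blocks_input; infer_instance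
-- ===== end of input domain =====

-- B splits the integer into eight 4-bit blocks by hex-formatting the low 32 bits instead of A's
-- shift-and-mask loop with a final reverse; objective: idiomatic (same O(1) cost).

-- ===== PORT A =====
def get_s_blocks_input (text : Int) : List Int :=
  (((List.range 8).foldl
      (fun (st : Int × List Int) (_ : Nat) =>
        (st.1 >>> (4 : Nat), st.2 ++ [PySem.Int.band st.1 15]))
      (text, [])).2).reverse

-- ===== PORT B =====
-- int(c, 16): value of one ASCII hex digit (exact on '0'-'9' and 'a'-'f', the only
-- characters format(·, '08x') produces)
def hexVal (c : Char) : Int :=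
  if c ≤ '9' then (c.toNat : Int) - 48 else (c.toNat : Int) - 87

-- format(n, '08x') (a stdlib call, ported via Mathlib's Nat.digits): lowercase hex
-- digits of n, zero-padded on the left to 8 characters
def hexPad8 (n : Nat) : List Char :=
  List.replicate (8 - ((Nat.digits 16 n).reverse.map Nat.digitChar).length) '0' ++
    (Nat.digits 16 n).reverse.map Nat.digitChar

def get_s_blocks_input_alt (text : Int) : List Int :=
  (hexPad8 (PySem.Int.band text 4294967295).toNat).map hexVal

-- ===== PRECONDITION & SPEC =====
def Spec_get_s_blocks_input (text : Int) (out : List Int) : Prop := out = get_s_blocks_input_alt text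
instance (text : Int) (out : List Int) : Decidable (Spec_get_s_blocks_input text out) := by unfold Spec_get_s_blocks_input; infer_instance

-- ===== CLAIM (what is proved, stated in full; the proofs are below) =====
def Claim_equal_get_s_blocks_input : Prop := ∀ (text : Int), Dom_get_s_blocks_input text → Spec_get_s_blocks_input text (get_s_blocks_input text)

-- ===== LEMMAS AND PROOFS =====

theorem band_mask15 (a : Int) : PySem.Int.band a 15 = a % 16 := by
  unfold PySem.Int.band
  split_ifs with h1 h2 h3 <;> try omega
  · have h15 : (15 : Int).toNat = 15 := rfl
    rw [h15, show (15 : Nat) = 2 ^ 4 - 1 from by norm_num, Nat.and_two_pow_sub_one_eq_mod]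
    omega
  · have h15 : (15 : Int).toNat = 15 := rfl
    rw [h15, Nat.and_comm, show (15 : Nat) = 2 ^ 4 - 1 from by norm_num,
      Nat.and_two_pow_sub_one_eq_mod]
    omega

theorem band_mask32 (a : Int) : PySem.Int.band a 4294967295 = a % 4294967296 := by
  unfold PySem.Int.band
  split_ifs with h1 h2 h3 <;> try omega
  · have hm : (4294967295 : Int).toNat = 4294967295 := rfl
    rw [hm, show (4294967295 : Nat) = 2 ^ 32 - 1 from by norm_num,
      Nat.and_two_pow_sub_one_eq_mod]
    omega
  · have hm : (4294967295 : Int).toNat = 4294967295 := rfl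
    rw [hm, Nat.and_comm, show (4294967295 : Nat) = 2 ^ 32 - 1 from by norm_num,
      Nat.and_two_pow_sub_one_eq_mod]
    omega

theorem shr4_eq (x : Int) : x >>> (4 : Nat) = x / 16 := by
  have h := Int.shiftRight_eq_div_pow x 4
  norm_num at h
  exact h

-- padding generalised over the width, for induction
def padHex (k n : Nat) : List Char :=
  List.replicate (k - ((Nat.digits 16 n).reverse.map Nat.digitChar).length) '0' ++
    (Nat.digits 16 n).reverse.map Nat.digitChar

-- the big-endian nibble list both programs compute
def specN : Nat → Nat → List Int
  | 0, _ => []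
  | k + 1, n => specN k (n / 16) ++ [((n % 16 : Nat) : Int)]

theorem hexPad8_eq_padHex (n : Nat) : hexPad8 n = padHex 8 n := rfl

theorem padHex_step (k n : Nat) :
    padHex (k + 1) n = padHex k (n / 16) ++ [Nat.digitChar (n % 16)] := by
  rcases Nat.eq_zero_or_pos n with h | h
  · subst h
    simp only [padHex, Nat.digits_zero, List.reverse_nil, List.map_nil, List.length_nil,
      Nat.sub_zero, List.append_nil, Nat.zero_div, Nat.zero_mod]
    rw [List.replicate_succ']
    rfl
  · rw [padHex, padHex, Nat.digits_def' (show (1:Nat) < 16 by norm_num) h]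
    simp only [List.reverse_cons, List.map_append, List.map_cons, List.map_nil,
      List.length_append, List.length_map, List.length_reverse, List.length_cons,
      List.length_nil]
    rw [List.append_assoc]
    congr 2
    omega

theorem hexVal_digitChar (r : Nat) (hr : r < 16) : hexVal (Nat.digitChar r) = (r : Int) := by
  interval_cases r <;> decide

theorem map_padHex (k : Nat) : ∀ n : Nat, n < 16 ^ k → (padHex k n).map hexVal = specN k n := by
  induction k with
  | zero =>
    intro n hn
    interval_cases n
    rfl
  | succ k ih =>
    intro n hn
    rw [padHex_step, List.map_append, ih (n / 16) (by
      rw [pow_succ] at hn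
      omega)]
    simp [specN, hexVal_digitChar (n % 16) (by omega)]

theorem alt_eq_specN (text : Int) :
    get_s_blocks_input_alt text = specN 8 (text % 4294967296).toNat := by
  unfold get_s_blocks_input_alt
  rw [band_mask32, hexPad8_eq_padHex]
  exact map_padHex 8 _ (by
    have : (16 : Nat) ^ 8 = 4294967296 := by norm_num
    omega)

-- ===== VERDICT (by name: the statement is the Claim_ definition above) =====
theorem get_s_blocks_input_spec : Claim_equal_get_s_blocks_input := by
  intro text _
  unfold Spec_get_s_blocks_input
  rw [alt_eq_specN]
  unfold get_s_blocks_input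
  simp only [List.range_succ, List.range_zero, List.nil_append, List.foldl_cons,
    List.foldl_nil, List.cons_append, band_mask15, shr4_eq, List.reverse_cons,
    List.reverse_nil]
  simp only [specN]
  simp only [List.nil_append, List.cons_append]
  refine List.ext_getElem (by simp) ?_
  intro i h₁ h₂
  have h8 : i < 8 := by simpa using h₁
  interval_cases i <;> simp <;> omega
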